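-- pv_equiv track=rewrite | github.com/rigoudyg/climaf | NEMO_atlas/reference.py | variable2reference
-- ===== SOURCE A (Python) =====
-- def variable2reference(variable, project=None) :
--     if not project:
--         if variable in ['pr','prw','rlut', 'rsut' , 'rlutcs', 'rsutcs', 'rlus', 'rsus' , 'rluscs', 'rsuscs', 'rlds', 'rsds',
--                         'rsdscs','rldscs','tas', 'ta', 'ua', 'va', 'psl', 'uas', 'vas', 'tos', 'sos', 'zos','hus','mlotst','alb',
--                         'to','so','so200','so1000','so2000','to200','to1000','to2000','sic','wfo']:
--             project='ref_climatos'
--         else: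
--             project='ref_ts'
--
--     refs = {
--         'ref_climatos' : {
--             'CERES'  : [ 'rlut', 'rsut' , 'rlutcs', 'rsutcs', 'rlus', 'rsus' , 'rluscs', 'rsuscs', 'rlds', 'rsds', 'rsdscs','rldscs' ] ,
--             'ERAINT' : [ 'tas', 'ta', 'psl', 'uas', 'vas' ,'hus','huss', 'ua', 'va','wfo'],
--             'RSS'    : [ 'prw' ],
--             'GPCP'   : ['pr'],
--             'NSIDC'  : ['sic'],
--             #'UKMETOFFICE-HadISST-v1-1' : [ 'tos' ],
--             'WOA13-v2': ['to','tos','to200','to1000','to2000'],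
--             'NODC-WOA09' : [ 'sos'],
--             'NODC-Levitus': ['so','so200','so1000','so2000'],
--             'CNES-AVISO-L4': [ 'zos' ],
--             'DeBoyerM' : ['mlotst','omlmax'],
--             'CLARA-A1-1deg': ['alb'],
--         },
--         'ref_ts' : {
--             'ERAInterim' : [ 'tas', 'psl' , 'uas' , 'vas', 'cldl', 'cldm', 'cldh' ],
--             'GPCP'   : [ 'pr'],
--             'CERES'  : [ 'rlut'  ,  'rsut'  ,      'rlutcs',   'rsutcs' ],
--             'NCEP'   : [ 'huss' ],
--             'MODIS-L3-C5' : ['clt'],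
--             'CLARA-A1-1deg': ['alb'],
--             'NSIDC' : ['sic'],
--         }
--     }
--     if project in refs :
--         for product in refs[project] :
--             if variable in refs[project][product] :
--                 return {'project':project,'product':product,'variable':variable}
-- ===== SOURCE B (Python) =====
-- # Flat precomputed reverse-index tables (variable -> product) per project; a query is a
-- # project-default test plus one dict lookup, no per-product scan.
--
-- _CLIMATO_DEFAULT_VARS = frozenset([
--     'pr', 'prw', 'rlut', 'rsut', 'rlutcs', 'rsutcs', 'rlus', 'rsus', 'rluscs', 'rsuscs',
--     'rlds', 'rsds', 'rsdscs', 'rldscs', 'tas', 'ta', 'ua', 'va', 'psl', 'uas', 'vas',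
--     'tos', 'sos', 'zos', 'hus', 'mlotst', 'alb', 'to', 'so', 'so200', 'so1000', 'so2000',
--     'to200', 'to1000', 'to2000', 'sic', 'wfo'])
--
-- _CLIMATO_INDEX = {
--     'rlut': 'CERES',
--     'rsut': 'CERES',
--     'rlutcs': 'CERES',
--     'rsutcs': 'CERES',
--     'rlus': 'CERES',
--     'rsus': 'CERES',
--     'rluscs': 'CERES',
--     'rsuscs': 'CERES',
--     'rlds': 'CERES',
--     'rsds': 'CERES',
--     'rsdscs': 'CERES',
--     'rldscs': 'CERES',
--     'tas': 'ERAINT',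
--     'ta': 'ERAINT',
--     'psl': 'ERAINT',
--     'uas': 'ERAINT',
--     'vas': 'ERAINT',
--     'hus': 'ERAINT',
--     'huss': 'ERAINT',
--     'ua': 'ERAINT',
--     'va': 'ERAINT',
--     'wfo': 'ERAINT',
--     'prw': 'RSS',
--     'pr': 'GPCP',
--     'sic': 'NSIDC',
--     'to': 'WOA13-v2',
--     'tos': 'WOA13-v2',
--     'to200': 'WOA13-v2',
--     'to1000': 'WOA13-v2',
--     'to2000': 'WOA13-v2',
--     'sos': 'NODC-WOA09',
--     'so': 'NODC-Levitus',
--     'so200': 'NODC-Levitus',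
--     'so1000': 'NODC-Levitus',
--     'so2000': 'NODC-Levitus',
--     'zos': 'CNES-AVISO-L4',
--     'mlotst': 'DeBoyerM',
--     'omlmax': 'DeBoyerM',
--     'alb': 'CLARA-A1-1deg',
-- }
--
-- _TS_INDEX = {
--     'tas': 'ERAInterim',
--     'psl': 'ERAInterim',
--     'uas': 'ERAInterim',
--     'vas': 'ERAInterim',
--     'cldl': 'ERAInterim',
--     'cldm': 'ERAInterim',
--     'cldh': 'ERAInterim',
--     'pr': 'GPCP',
--     'rlut': 'CERES',
--     'rsut': 'CERES',
--     'rlutcs': 'CERES',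
--     'rsutcs': 'CERES',
--     'huss': 'NCEP',
--     'clt': 'MODIS-L3-C5',
--     'alb': 'CLARA-A1-1deg',
--     'sic': 'NSIDC',
-- }
--
--
-- def variable2reference(variable, project=None):
--     if not project:
--         project = 'ref_climatos' if variable in _CLIMATO_DEFAULT_VARS else 'ref_ts'
--     if project == 'ref_climatos':
--         product = _CLIMATO_INDEX.get(variable)
--     elif project == 'ref_ts':
--         product = _TS_INDEX.get(variable)
--     else:
--         return None
--     if product is None:
--         return None
--     return {'project': project, 'product': product, 'variable': variable}
-- ===== Notes on version B (the rewrite author's own statement) =====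
-- stated objective: alternative
-- what changed: B replaces A's per-call nested scan (loop over products, membership test in each product's variable list) by two flat precomputed reverse-index dicts variable->product, answering with an if/elif on the project plus a single dict lookup.
import Mathlib
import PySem

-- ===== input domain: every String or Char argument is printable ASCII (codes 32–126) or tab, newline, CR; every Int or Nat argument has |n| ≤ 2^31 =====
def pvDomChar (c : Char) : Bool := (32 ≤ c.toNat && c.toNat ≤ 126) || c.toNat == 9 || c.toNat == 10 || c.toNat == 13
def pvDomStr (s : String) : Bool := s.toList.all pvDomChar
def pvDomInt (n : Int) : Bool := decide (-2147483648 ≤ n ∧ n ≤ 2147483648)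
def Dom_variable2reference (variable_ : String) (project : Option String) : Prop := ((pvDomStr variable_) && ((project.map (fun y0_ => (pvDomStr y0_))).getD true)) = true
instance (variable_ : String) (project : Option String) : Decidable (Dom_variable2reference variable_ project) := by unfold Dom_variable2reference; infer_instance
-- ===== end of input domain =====

-- B replaces A's per-call scan over the nested product→variables tables by two flat precomputed
-- reverse-index dicts (variable → product), so a query is one if/elif on the project plus one lookup.

-- ===== PORT A =====
-- A's default-project list and nested reference tables, verbatim.
def pvClimatoDefaultVars : List String := ["pr","prw","rlut","rsut","rlutcs","rsutcs","rlus","rsus","rluscs","rsuscs","rlds","rsds","rsdscs","rldscs","tas","ta","ua","va","psl","uas","vas","tos","sos","zos","hus","mlotst","alb","to","so","so200","so1000","so2000","to200","to1000","to2000","sic","wfo"]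

def pvTblClimatos : List (String × List String) :=
  [("CERES", ["rlut","rsut","rlutcs","rsutcs","rlus","rsus","rluscs","rsuscs","rlds","rsds","rsdscs","rldscs"]),
   ("ERAINT", ["tas","ta","psl","uas","vas","hus","huss","ua","va","wfo"]),
   ("RSS", ["prw"]),
   ("GPCP", ["pr"]),
   ("NSIDC", ["sic"]),
   ("WOA13-v2", ["to","tos","to200","to1000","to2000"]),
   ("NODC-WOA09", ["sos"]),
   ("NODC-Levitus", ["so","so200","so1000","so2000"]),
   ("CNES-AVISO-L4", ["zos"]),
   ("DeBoyerM", ["mlotst","omlmax"]),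
   ("CLARA-A1-1deg", ["alb"])]

def pvTblTs : List (String × List String) :=
  [("ERAInterim", ["tas","psl","uas","vas","cldl","cldm","cldh"]),
   ("GPCP", ["pr"]),
   ("CERES", ["rlut","rsut","rlutcs","rsutcs"]),
   ("NCEP", ["huss"]),
   ("MODIS-L3-C5", ["clt"]),
   ("CLARA-A1-1deg", ["alb"]),
   ("NSIDC", ["sic"])]

-- 'for product in refs[project]: if variable in refs[project][product]: return {...}'; the inner
-- dict has distinct keys, so iterating its keys and indexing is exactly iterating the pair list.
def pvLoopA (variable_ projectv : String) : List (String × List String) → Option (List (String × String))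
  | [] => none
  | (product, vars) :: rest =>
      if variable_ ∈ vars then
        some [("project", projectv), ("product", product), ("variable", variable_)]
      else pvLoopA variable_ projectv rest

-- 'if not project: ...' (Python treats '' as falsy, hence the p = "" test).
def variable2reference (variable_ : String) (project : Option String) : Option (List (String × String)) :=
  let projectv :=
    match project with
    | none => if variable_ ∈ pvClimatoDefaultVars then "ref_climatos" else "ref_ts"
    | some p => if p = "" then (if variable_ ∈ pvClimatoDefaultVars then "ref_climatos" else "ref_ts") else p
  let refs : PySem.Dict String (List (String × List String)) :=
    PySem.Dict.ofList [("ref_climatos", pvTblClimatos), ("ref_ts", pvTblTs)]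
  match refs.get? projectv with
  | none => none                       -- 'if project in refs' fails: implicit None
  | some tbl => pvLoopA variable_ projectv tbl

-- ===== PORT B =====
-- B's frozenset of default-climato variables (PySem.Set) and its two flat literal index dicts.
def pvClimDefaultSetB : PySem.Set String :=
  PySem.Set.ofList ["pr","prw","rlut","rsut","rlutcs","rsutcs","rlus","rsus","rluscs","rsuscs","rlds","rsds","rsdscs","rldscs","tas","ta","ua","va","psl","uas","vas","tos","sos","zos","hus","mlotst","alb","to","so","so200","so1000","so2000","to200","to1000","to2000","sic","wfo"]

def pvClimIdxB : PySem.Dict String String := PySem.Dict.ofList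
  [("rlut","CERES"), ("rsut","CERES"), ("rlutcs","CERES"), ("rsutcs","CERES"), ("rlus","CERES"), ("rsus","CERES"), ("rluscs","CERES"), ("rsuscs","CERES"), ("rlds","CERES"), ("rsds","CERES"), ("rsdscs","CERES"), ("rldscs","CERES"), ("tas","ERAINT"), ("ta","ERAINT"), ("psl","ERAINT"), ("uas","ERAINT"), ("vas","ERAINT"), ("hus","ERAINT"), ("huss","ERAINT"), ("ua","ERAINT"), ("va","ERAINT"), ("wfo","ERAINT"), ("prw","RSS"), ("pr","GPCP"), ("sic","NSIDC"), ("to","WOA13-v2"), ("tos","WOA13-v2"), ("to200","WOA13-v2"), ("to1000","WOA13-v2"), ("to2000","WOA13-v2"), ("sos","NODC-WOA09"), ("so","NODC-Levitus"), ("so200","NODC-Levitus"), ("so1000","NODC-Levitus"), ("so2000","NODC-Levitus"), ("zos","CNES-AVISO-L4"), ("mlotst","DeBoyerM"), ("omlmax","DeBoyerM"), ("alb","CLARA-A1-1deg")]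

def pvTsIdxB : PySem.Dict String String := PySem.Dict.ofList
  [("tas","ERAInterim"), ("psl","ERAInterim"), ("uas","ERAInterim"), ("vas","ERAInterim"), ("cldl","ERAInterim"), ("cldm","ERAInterim"), ("cldh","ERAInterim"), ("pr","GPCP"), ("rlut","CERES"), ("rsut","CERES"), ("rlutcs","CERES"), ("rsutcs","CERES"), ("huss","NCEP"), ("clt","MODIS-L3-C5"), ("alb","CLARA-A1-1deg"), ("sic","NSIDC")]

def variable2reference_alt (variable_ : String) (project : Option String) : Option (List (String × String)) :=
  let projectv :=
    match project with
    | none => if pvClimDefaultSetB.contains variable_ then "ref_climatos" else "ref_ts"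
    | some p => if p = "" then (if pvClimDefaultSetB.contains variable_ then "ref_climatos" else "ref_ts") else p
  let product? :=
    if projectv = "ref_climatos" then pvClimIdxB.get? variable_
    else if projectv = "ref_ts" then pvTsIdxB.get? variable_
    else none                          -- unknown project: 'return None'
  match product? with
  | none => none                       -- 'if product is None: return None'
  | some product => some [("project", projectv), ("product", product), ("variable", variable_)]

-- ===== PRECONDITION & SPEC =====
def Spec_variable2reference (variable_ : String) (project : Option String) (out : Option (List (String × String))) : Prop := out = variable2reference_alt variable_ project
instance (variable_ : String) (project : Option String) (out : Option (List (String × String))) : Decidable (Spec_variable2reference variable_ project out) := by unfold Spec_variable2reference; infer_instance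

-- ===== CLAIM =====
def Claim_equal_variable2reference : Prop := ∀ (variable_ : String) (project : Option String), Dom_variable2reference variable_ project → Spec_variable2reference variable_ project (variable2reference variable_ project)

-- ===== LEMMAS AND PROOFS =====

-- flatten a product→variables table into a (variable, product) association list
def pvFlatten (tbl : List (String × List String)) : List (String × String) :=
  tbl.flatMap (fun pv => pv.2.map (fun x => (x, pv.1)))

theorem pvGetMk_append (l1 l2 : List (String × String)) (v : String) :
    (PySem.Dict.mk (l1 ++ l2)).get? v
      = ((PySem.Dict.mk l1).get? v).or ((PySem.Dict.mk l2).get? v) := by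
  induction l1 with
  | nil => simp [PySem.Dict.get?]
  | cons kv rest ih =>
    obtain ⟨k, w⟩ := kv
    rw [List.cons_append, PySem.Dict.get?_mk_cons, PySem.Dict.get?_mk_cons]
    by_cases h : (k == v) = true <;> simp [h, ih]

theorem pvGetMk_map (vs : List String) (p v : String) :
    (PySem.Dict.mk (vs.map (fun x => (x, p)))).get? v
      = (if v ∈ vs then some p else none) := by
  induction vs with
  | nil => simp [PySem.Dict.get?]
  | cons x xs ih =>
    rw [List.map_cons, PySem.Dict.get?_mk_cons, ih]
    by_cases h : x = v
    · subst h; simp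
    · have hb : (x == v) = false := beq_eq_false_iff_ne.mpr h
      have h' : ¬ v = x := fun hh => h hh.symm
      simp [hb, List.mem_cons, h']

-- the flat index answers exactly what A's product loop finds (first product containing v)
theorem pvGetMk_flatten (tbl : List (String × List String)) (v q : String) :
    pvLoopA v q tbl
      = ((PySem.Dict.mk (pvFlatten tbl)).get? v).map
          (fun product => [("project", q), ("product", product), ("variable", v)]) := by
  induction tbl with
  | nil => simp [pvLoopA, pvFlatten, PySem.Dict.get?]
  | cons pv rest ih =>
    obtain ⟨product, vars⟩ := pv
    rw [pvLoopA]
    have hf : pvFlatten ((product, vars) :: rest)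
        = vars.map (fun x => (x, product)) ++ pvFlatten rest := by
      simp [pvFlatten]
    rw [hf, pvGetMk_append, pvGetMk_map]
    by_cases h : v ∈ vars <;> simp [h, ih]

-- B's literal dicts are exactly the flattened tables (no duplicate variables within a project)
set_option maxRecDepth 40000 in
theorem pvClimIdxB_eq : pvClimIdxB = PySem.Dict.mk (pvFlatten pvTblClimatos) := by decide
set_option maxRecDepth 40000 in
theorem pvTsIdxB_eq : pvTsIdxB = PySem.Dict.mk (pvFlatten pvTblTs) := by decide

set_option maxRecDepth 40000 in
theorem pvBranch (variable_ q : String) :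
    (match (PySem.Dict.ofList [("ref_climatos", pvTblClimatos), ("ref_ts", pvTblTs)]).get? q with
     | none => none
     | some tbl => pvLoopA variable_ q tbl)
      = (match (if q = "ref_climatos" then pvClimIdxB.get? variable_
                else if q = "ref_ts" then pvTsIdxB.get? variable_
                else none) with
         | none => (none : Option (List (String × String)))
         | some product => some [("project", q), ("product", product), ("variable", variable_)]) := by
  have ha : (PySem.Dict.ofList [("ref_climatos", pvTblClimatos), ("ref_ts", pvTblTs)])
      = PySem.Dict.mk [("ref_climatos", pvTblClimatos), ("ref_ts", pvTblTs)] := rfl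
  rw [ha]
  by_cases h1 : q = "ref_climatos"
  · subst h1
    simp only [PySem.Dict.get?_mk_cons, BEq.rfl, if_true]
    rw [pvGetMk_flatten pvTblClimatos variable_ "ref_climatos", ← pvClimIdxB_eq]
    cases pvClimIdxB.get? variable_ <;> simp
  · by_cases h2 : q = "ref_ts"
    · subst h2
      have e1 : (("ref_climatos" : String) == "ref_ts") = false := by decide
      simp only [PySem.Dict.get?_mk_cons, e1, Bool.false_eq_true, if_false, BEq.rfl, if_true]
      rw [pvGetMk_flatten pvTblTs variable_ "ref_ts", ← pvTsIdxB_eq]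
      have : ¬ (("ref_ts" : String) = "ref_climatos") := by decide
      cases pvTsIdxB.get? variable_ <;> simp [this]
    · have e1 : (("ref_climatos" : String) == q) = false :=
        beq_eq_false_iff_ne.mpr (fun h => h1 h.symm)
      have e2 : (("ref_ts" : String) == q) = false :=
        beq_eq_false_iff_ne.mpr (fun h => h2 h.symm)
      simp only [PySem.Dict.get?_mk_cons, e1, e2, Bool.false_eq_true, if_false, h1, h2]
      rfl

-- both default-project tests agree: list membership = frozenset membership on the same literals
theorem pvDefault_eq (v : String) :
    (v ∈ pvClimatoDefaultVars) ↔ (pvClimDefaultSetB.contains v = true) := by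
  rw [PySem.Set.contains_iff]
  unfold pvClimDefaultSetB
  rw [PySem.Set.mem_ofList]
  rfl

-- ===== VERDICT =====
set_option maxRecDepth 40000 in
theorem variable2reference_spec : Claim_equal_variable2reference := by
  intro variable_ project _
  unfold Spec_variable2reference variable2reference variable2reference_alt
  have hd : (if variable_ ∈ pvClimatoDefaultVars then "ref_climatos" else "ref_ts")
      = (if pvClimDefaultSetB.contains variable_ then "ref_climatos" else "ref_ts") := by
    by_cases h : variable_ ∈ pvClimatoDefaultVars
    · rw [if_pos h, if_pos ((pvDefault_eq variable_).mp h)]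
    · rw [if_neg h, if_neg (fun hc => h ((pvDefault_eq variable_).mpr hc))]
  cases project with
  | none => simp only [hd]; exact pvBranch variable_ _
  | some p =>
    by_cases hp : p = "" <;> simp only [hp, if_false, hd] <;>
      exact pvBranch variable_ _
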